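-- pv_equiv track=rewrite | github.com/harshitbhat/Competitve-Coding | 271A.py | hasDistinct
-- ===== SOURCE A (Python) =====
-- def hasDistinct(num):
--     hasDup = {}
--     for i in num:
--         hasDup[i] = 1
--     if len(hasDup) == 4:
--         return True
--     else:
--         return False
-- ===== SOURCE B (Python) =====
-- def hasDistinct(num):
--     s = sorted(num)
--     count = 0
--     prev = None
--     for c in s:
--         if prev is None or c != prev:
--             count += 1
--         prev = c
--     return count == 4
-- ===== Notes on version B (the rewrite author's own statement) =====
-- stated objective: alternative
-- what changed: Replaces the hash-dict distinct-key build with sorting the characters and counting boundaries between adjacent unequal elements in one scan.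
import Mathlib
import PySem

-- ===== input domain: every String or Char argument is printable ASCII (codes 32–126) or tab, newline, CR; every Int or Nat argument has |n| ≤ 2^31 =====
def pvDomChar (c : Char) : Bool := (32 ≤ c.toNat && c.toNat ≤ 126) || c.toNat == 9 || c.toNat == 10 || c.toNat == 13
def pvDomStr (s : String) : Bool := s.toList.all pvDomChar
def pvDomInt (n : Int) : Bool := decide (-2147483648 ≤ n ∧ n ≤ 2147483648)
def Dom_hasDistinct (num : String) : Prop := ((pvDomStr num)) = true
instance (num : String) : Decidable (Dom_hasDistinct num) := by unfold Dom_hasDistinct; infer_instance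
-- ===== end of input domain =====

-- B replaces A's dict-of-seen-characters with sort + adjacent-comparison counting (alternative, not faster).

-- ===== PORT A =====
def hasDistinct (num : String) : Bool :=
  let hasDup := num.toList.foldl (fun d i => d.insert i (1 : Int)) PySem.Dict.empty
  if hasDup.size = 4 then true else false

-- ===== PORT B =====
def hasDistinct_alt (num : String) : Bool :=
  let s := PySem.List.sorted num.toList (fun x => x) false
  let r := s.foldl
    (fun st c => ((if st.2 = none ∨ st.2 ≠ some c then st.1 + 1 else st.1), some c))
    ((0 : Int), (none : Option Char))
  decide (r.1 = 4)

-- ===== PRECONDITION & SPEC =====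
def Spec_hasDistinct (num : String) (out : Bool) : Prop := out = hasDistinct_alt num
instance (num : String) (out : Bool) : Decidable (Spec_hasDistinct num out) := by unfold Spec_hasDistinct; infer_instance

-- ===== CLAIM (what is proved, stated in full; the proofs are below) =====
def Claim_equal_hasDistinct : Prop := ∀ (num : String), Dom_hasDistinct num → Spec_hasDistinct num (hasDistinct num)

-- ===== LEMMAS AND PROOFS =====

-- abstract form of B's scan count, recursing on the list with the previous element as state
def pvG : Option Char → List Char → Int
  | _, [] => 0
  | p, x :: t => (if p = none ∨ p ≠ some x then 1 else 0) + pvG (some x) t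

theorem pvFoldl_scan (l : List Char) (k : Int) (p : Option Char) :
    (l.foldl
      (fun st c => ((if st.2 = none ∨ st.2 ≠ some c then st.1 + 1 else st.1), some c))
      (k, p)).1 = k + pvG p l := by
  induction l generalizing k p with
  | nil => simp [pvG]
  | cons x t ih =>
    simp only [List.foldl_cons, pvG, ih]
    split_ifs <;> omega

theorem pvG_some (l : List Char) (hl : l.Pairwise (· ≤ ·)) (p : Char)
    (hp : ∀ x ∈ l, p ≤ x) : pvG (some p) l = ((l.toFinset.erase p).card : Int) := by
  induction l generalizing p with
  | nil => simp [pvG]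
  | cons x t ih =>
    have hxt : ∀ y ∈ t, x ≤ y := fun y hy => (List.pairwise_cons.mp hl).1 y hy
    have ht : t.Pairwise (· ≤ ·) := (List.pairwise_cons.mp hl).2
    have hins : (insert x t.toFinset).card = (t.toFinset.erase x).card + 1 := by
      by_cases hx : x ∈ t.toFinset
      · have h1 := Finset.card_erase_of_mem hx
        have h2 : (insert x t.toFinset) = t.toFinset := Finset.insert_eq_self.mpr hx
        have h3 : 1 ≤ t.toFinset.card := Finset.card_pos.mpr ⟨x, hx⟩
        rw [h2]; omega
      · rw [Finset.card_insert_of_notMem hx, Finset.erase_eq_of_notMem hx]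
    by_cases hpx : p = x
    · subst hpx
      simp only [pvG, ih ht p hxt, List.toFinset_cons, Finset.erase_insert_eq_erase]
      simp
    · have hpltx : p < x := lt_of_le_of_ne (hp x (List.mem_cons_self)) hpx
      have hpnot : p ∉ insert x t.toFinset := by
        simp only [Finset.mem_insert, List.mem_toFinset]
        rintro (h | h)
        · exact hpx h
        · have hmem : p ∈ t := by simpa using h
          have := hxt p hmem
          exact absurd (le_antisymm (le_of_lt hpltx) this) hpx
      have herase : (insert x t.toFinset).erase p = insert x t.toFinset :=
        Finset.erase_eq_of_notMem hpnot
      simp only [pvG, ih ht x hxt, List.toFinset_cons, herase]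
      have : p ≠ x → ¬(some p = none ∨ some p ≠ some x) → False := by simp [hpx]
      rw [if_pos (Or.inr (by simpa using hpx))]
      rw [hins]
      push_cast
      ring

theorem pvG_none (l : List Char) (hl : l.Pairwise (· ≤ ·)) :
    pvG none l = (l.toFinset.card : Int) := by
  cases l with
  | nil => simp [pvG]
  | cons x t =>
    have hxt : ∀ y ∈ t, x ≤ y := fun y hy => (List.pairwise_cons.mp hl).1 y hy
    have ht : t.Pairwise (· ≤ ·) := (List.pairwise_cons.mp hl).2
    have hins : (insert x t.toFinset).card = (t.toFinset.erase x).card + 1 := by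
      by_cases hx : x ∈ t.toFinset
      · have h1 := Finset.card_erase_of_mem hx
        have h2 : (insert x t.toFinset) = t.toFinset := Finset.insert_eq_self.mpr hx
        have h3 : 1 ≤ t.toFinset.card := Finset.card_pos.mpr ⟨x, hx⟩
        rw [h2]; omega
      · rw [Finset.card_insert_of_notMem hx, Finset.erase_eq_of_notMem hx]
    simp only [pvG, pvG_some t ht x hxt, List.toFinset_cons, hins]
    simp
    ring

theorem pvAlt_eq (num : String) :
    hasDistinct_alt num = decide (num.toList.toFinset.card = 4) := by
  unfold hasDistinct_alt
  have hperm : (PySem.List.sorted num.toList (fun x => x) false).Perm num.toList :=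
    PySem.List.sorted_perm _ _ _
  have hpw : (PySem.List.sorted num.toList (fun x => x) false).Pairwise (· ≤ ·) := by
    simpa using PySem.List.sorted_pairwise (xs := num.toList) (key := fun x => x)
  have := pvFoldl_scan (PySem.List.sorted num.toList (fun x => x) false) 0 none
  simp only []
  rw [this, pvG_none _ hpw, List.toFinset_eq_of_perm _ _ hperm]
  simp
  omega

theorem pvA_eq (num : String) :
    hasDistinct num = decide (num.toList.toFinset.card = 4) := by
  unfold hasDistinct
  have hkeys : (num.toList.foldl (fun d i => d.insert i (1 : Int)) PySem.Dict.empty).keys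
      = PySem.Set.update PySem.Dict.empty.keys num.toList :=
    PySem.Dict.keys_foldl_insert num.toList (fun _ _ => (1 : Int)) _
  have hsize : ∀ (d : PySem.Dict Char Int), d.size = d.keys.length := by
    intro d
    simp [PySem.Dict.size, PySem.Dict.keys]
  have hupd : PySem.Set.update (PySem.Dict.empty (κ := Char) (ν := Int)).keys num.toList
      = PySem.Set.ofList num.toList := by
    simp [PySem.Dict.keys_empty, PySem.Set.update, PySem.Set.ofList_eq_foldl]
  have hnodup : (PySem.Set.ofList num.toList).Nodup := PySem.Set.nodup_ofList _
  have hfin : (PySem.Set.ofList num.toList).toFinset = num.toList.toFinset := by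
    ext c
    simp [PySem.Set.mem_ofList]
  have hlen : (PySem.Set.ofList num.toList).length = num.toList.toFinset.card := by
    rw [← hfin, List.toFinset_card_of_nodup hnodup]
  simp only [hsize, hkeys, hupd, hlen]
  by_cases h : num.toList.toFinset.card = 4 <;> simp [h]

-- ===== VERDICT (by name: the statement is the Claim_ definition above) =====
theorem hasDistinct_spec : Claim_equal_hasDistinct := by
  intro num _
  unfold Spec_hasDistinct
  rw [pvA_eq, pvAlt_eq]
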